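-- pv_equiv track=rewrite | github.com/du34n/problems | recursion_problem.py | sum_int
-- ===== SOURCE A (Python) =====
-- def sum_int(num):
--
--     toplam = 0
--     for i in str(num):
--         toplam += int(i)
--
--     if(toplam % 2 == 0):
--         return toplam
--     else:
--         return sum_int(toplam)
-- ===== SOURCE B (Python) =====
-- def sum_int(num):
--     while True:
--         s = 0
--         n = num
--         while n > 9:
--             n, d = divmod(n, 10)
--             s += d
--         s += n
--         if s % 2 == 0:
--             return s
--         num = s
-- ===== Notes on version B (the rewrite author's own statement) =====
-- stated objective: alternative
-- what changed: Replaces A's tail recursion with an explicit while loop and extracts digits arithmetically with divmod instead of iterating over str(num).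
import Mathlib
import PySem

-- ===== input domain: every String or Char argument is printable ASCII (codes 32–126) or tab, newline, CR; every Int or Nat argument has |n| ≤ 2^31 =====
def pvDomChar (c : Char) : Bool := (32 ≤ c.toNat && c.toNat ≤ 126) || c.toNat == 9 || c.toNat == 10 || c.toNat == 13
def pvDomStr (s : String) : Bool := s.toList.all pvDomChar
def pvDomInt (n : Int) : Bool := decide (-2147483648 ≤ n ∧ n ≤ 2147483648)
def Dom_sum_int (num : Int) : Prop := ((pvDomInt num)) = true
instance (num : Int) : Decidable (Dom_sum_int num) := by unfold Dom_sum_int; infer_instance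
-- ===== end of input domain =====

-- B replaces A's tail recursion with an explicit while loop and extracts digits
-- arithmetically with divmod instead of iterating over str(num) (objective: alternative).

-- ===== PORT A =====
-- `for i in str(num): toplam += int(i)`; `int('-')` raises ValueError (only reachable for
-- num < 0, outside Pre_), marked by `.getD 0`.  A's self-recursion does not terminate on all
-- inputs (RecursionError), so the port carries a fuel counter; fuel 100 is never exhausted
-- inside Pre_.
def sum_intFuel : Nat → Int → Int
  | 0, _ => 0
  | f+1, num =>
    let toplam := (PySem.Int.toChars num).foldl
      (fun t i => t + (PySem.Int.ofChars? [i]).getD 0) 0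
    if PySem.Int.mod toplam 2 == 0 then toplam else sum_intFuel f toplam

def sum_int (num : Int) : Int := sum_intFuel 100 num

-- ===== PORT B =====
-- inner loop `while n > 9: n, d = divmod(n, 10); s += d` then `s += n`
def sum_int_altDigits (s n : Int) : Int :=
  if n > 9 then
    sum_int_altDigits (s + PySem.Int.mod n 10) (PySem.Int.floordiv n 10)
  else s + n
termination_by n.toNat
decreasing_by
  have h10 : PySem.Int.floordiv n 10 = n / 10 := PySem.Int.floordiv_eq_ediv_of_pos (by norm_num)
  rw [h10]; omega

-- outer `while True: … if s % 2 == 0: return s; num = s`, with fuel (never exhausted inside Pre_)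
def sum_int_altFuel : Nat → Int → Int
  | 0, _ => 0
  | f+1, num =>
    let s := sum_int_altDigits 0 num
    if PySem.Int.mod s 2 == 0 then s else sum_int_altFuel f s

def sum_int_alt (num : Int) : Int := sum_int_altFuel 100 num

-- ===== PRECONDITION & SPEC =====
-- decimal digit sum, stated independently of both ports
def dsum (n : Int) : Int := ((Nat.digits 10 n.toNat).map Int.ofNat).sum

-- Pre_ excludes exactly the inputs where Python A raises: negative num (ValueError from
-- int('-')) and nonnegative num whose first three iterated digit sums are all odd, on which
-- the recursion never reaches an even sum (RecursionError).
def Pre_sum_int (num : Int) : Prop :=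
  0 ≤ num ∧ (dsum num % 2 = 0 ∨ dsum (dsum num) % 2 = 0 ∨ dsum (dsum (dsum num)) % 2 = 0)
instance (num : Int) : Decidable (Pre_sum_int num) := by unfold Pre_sum_int; infer_instance

def pvWitness_sum_int : Int := 11

def Spec_sum_int (num : Int) (out : Int) : Prop := out = sum_int_alt num
instance (num : Int) (out : Int) : Decidable (Spec_sum_int num out) := by unfold Spec_sum_int; infer_instance

-- ===== CLAIM (what is proved, stated in full; the proofs are below) =====
def Claim_equal_sum_int : Prop :=
  ∀ (num : Int), Dom_sum_int num → Pre_sum_int num → Spec_sum_int num (sum_int num)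

-- ===== LEMMAS AND PROOFS =====

lemma toDigitsCore_eq (f : Nat) : ∀ (n : Nat) (ds : List Char), 0 < n → n ≤ f →
    Nat.toDigitsCore 10 f n ds = ((Nat.digits 10 n).map Nat.digitChar).reverse ++ ds := by
  induction f with
  | zero => intro n ds h1 h2; omega
  | succ f ih =>
    intro n ds h1 h2
    rw [Nat.toDigitsCore]
    by_cases h : n / 10 = 0
    · have hn : n < 10 := by omega
      simp only [h, if_true]
      rw [Nat.digits_def' (by norm_num : 1 < 10) h1, h, Nat.digits_zero]
      simp [Nat.mod_eq_of_lt hn]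
    · simp only [h, if_false]
      rw [ih (n / 10) _ (Nat.pos_of_ne_zero h) (by omega)]
      rw [Nat.digits_def' (by norm_num : 1 < 10) h1]
      simp

lemma toDigits10_eq (m : Nat) (hm : m ≠ 0) :
    Nat.toDigits 10 m = ((Nat.digits 10 m).map Nat.digitChar).reverse := by
  unfold Nat.toDigits
  rw [toDigitsCore_eq (m + 1) m [] (Nat.pos_of_ne_zero hm) (by omega)]
  simp

lemma ofChars?_digitChar (d : Nat) (hd : d < 10) :
    PySem.Int.ofChars? [Nat.digitChar d] = some (d : Int) := by
  interval_cases d <;> decide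

lemma dsum_nonneg (n : Int) : 0 ≤ dsum n := by
  unfold dsum
  apply List.sum_nonneg
  intro x hx
  simp only [List.mem_map] at hx
  obtain ⟨d, _, rfl⟩ := hx
  exact Int.natCast_nonneg d

lemma dsum_small (n : Int) (h0 : 0 ≤ n) (h9 : n ≤ 9) : dsum n = n := by
  unfold dsum
  by_cases h : n = 0
  · simp [h]
  · rw [Nat.digits_def' (by norm_num : 1 < 10) (by omega : 0 < n.toNat)]
    have : n.toNat % 10 = n.toNat := Nat.mod_eq_of_lt (by omega)
    rw [this]
    have : n.toNat / 10 = 0 := Nat.div_eq_of_lt (by omega)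
    rw [this]
    simp
    omega

lemma dsum_step (n : Int) (h : 9 < n) : dsum n = n % 10 + dsum (n / 10) := by
  unfold dsum
  rw [Nat.digits_def' (by norm_num : 1 < 10) (by omega : 0 < n.toNat)]
  have e1 : ((n.toNat % 10 : Nat) : Int) = n % 10 := by omega
  have e2 : n.toNat / 10 = (n / 10).toNat := by omega
  rw [List.map_cons, List.sum_cons, e2]
  simp only [Int.ofNat_eq_natCast, e1]

lemma foldA_eq (n : Int) (hn : 0 ≤ n) :
    (PySem.Int.toChars n).foldl (fun t i => t + (PySem.Int.ofChars? [i]).getD 0) 0 = dsum n := by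
  rw [PySem.Int.toChars, if_neg (by omega)]
  by_cases h0 : n.toNat = 0
  · rw [h0]
    have hn0 : n = 0 := by omega
    rw [hn0]
    decide
  · rw [toDigits10_eq n.toNat h0, PySem.List.foldl_add]
    unfold dsum
    rw [List.map_reverse, List.sum_reverse, List.map_map]
    have hmap : (Nat.digits 10 n.toNat).map
        ((fun c => (PySem.Int.ofChars? [c]).getD 0) ∘ Nat.digitChar)
        = (Nat.digits 10 n.toNat).map Int.ofNat := by
      apply List.map_congr_left
      intro d hd
      have hlt : d < 10 := Nat.digits_lt_base (by norm_num) hd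
      simp [Function.comp, ofChars?_digitChar d hlt]
    rw [hmap, Int.zero_add]

lemma innerB_eq : ∀ (k : Nat) (n : Int), n.toNat = k → 0 ≤ n →
    ∀ s : Int, sum_int_altDigits s n = s + dsum n := by
  intro k
  induction k using Nat.strong_induction_on with
  | _ k ih =>
    intro n hk hn s
    rw [sum_int_altDigits]
    by_cases h : n > 9
    · rw [if_pos h]
      have hm : PySem.Int.mod n 10 = n % 10 := PySem.Int.mod_eq_emod_of_pos (by norm_num)
      have hd : PySem.Int.floordiv n 10 = n / 10 := PySem.Int.floordiv_eq_ediv_of_pos (by norm_num)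
      rw [hm, hd, ih (n / 10).toNat (by omega) _ rfl (by omega), dsum_step n (by omega)]
      ring
    · rw [if_neg h, dsum_small n hn (by omega)]

lemma fuel_eq : ∀ (f : Nat) (num : Int), 0 ≤ num → sum_intFuel f num = sum_int_altFuel f num := by
  intro f
  induction f with
  | zero => intro num _; rfl
  | succ f ih =>
    intro num hn
    rw [sum_intFuel, sum_int_altFuel]
    simp only [foldA_eq num hn, innerB_eq num.toNat num rfl hn 0, Int.zero_add]
    by_cases h : PySem.Int.mod (dsum num) 2 == 0
    · rw [if_pos h, if_pos h]
    · rw [if_neg h, if_neg h]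
      exact ih (dsum num) (dsum_nonneg num)

-- ===== VERDICT (by name: the statement is the Claim_ definition above) =====
theorem sum_int_spec : Claim_equal_sum_int := by
  intro num _ hpre
  unfold Spec_sum_int sum_int sum_int_alt
  exact fuel_eq 100 num hpre.1
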